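-- pv_equiv track=rewrite | github.com/BestFromAbove/pyth_projects | proj07.py | calc_similarity_scores
-- ===== SOURCE A (Python) =====
-- def num_in_common_between_lists(list1, list2):
--     ''' compares list one to list two, if similarity, adds one to variable'''
--     similiarity = 0
--     for friend in list1:
--         if friend in list2:
--             similiarity += 1
--     return similiarity
--
-- def init_matrix(n):
--     '''Create an nxn matrix, initialize with zeros, and return the matrix.'''
--     matrix = []
--     for row in range(n):  # for each of the n rows
--         matrix.append([])  # create the row and initialize as empty
--         for column in range(n):
--             matrix[row].append(0)  # append a 0 for each of the n columns
--     return matrix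
--
-- def calc_similarity_scores(network):
--     ''' Takes index and puts into num_in_common function to check for
--     similiarty, then compares similairties scores and puts into sim_matrix '''
--
--     n = len(network)
--     sim_matrix = init_matrix(n) # creates new list with n rows
--     index1 = 0
--     while index1 < n:
--         list1 = network[index1]
--         index2 = 0
--         while index2 < n:
--             list2 = network[index2]
--             common = num_in_common_between_lists(list1, list2)
--             sim_matrix[index1][index2] = common
--             index2 += 1
--         index1 += 1
--     return sim_matrix
-- ===== SOURCE B (Python) =====
-- def calc_similarity_scores(network):
--     ''' Same scores via hashing: one Counter per list and one membership set
--     per list, then each cell is a filtered sum of counter entries. '''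
--     member_sets = [set(lst) for lst in network]
--     counters = []
--     for lst in network:
--         c = {}
--         for v in lst:
--             c[v] = c.get(v, 0) + 1
--         counters.append(c)
--     return [[sum(cnt for v, cnt in c.items() if v in s) for s in member_sets]
--             for c in counters]
-- ===== Notes on version B (the rewrite author's own statement) =====
-- stated objective: faster
-- what changed: Replaced the nested index while-loops that fill a preallocated zero matrix with per-pair linear membership rescans of list1 by hash-based precomputation: one Counter and one membership set per list are built once, and each cell becomes a sum of counter entries filtered by the set.
import Mathlib
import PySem

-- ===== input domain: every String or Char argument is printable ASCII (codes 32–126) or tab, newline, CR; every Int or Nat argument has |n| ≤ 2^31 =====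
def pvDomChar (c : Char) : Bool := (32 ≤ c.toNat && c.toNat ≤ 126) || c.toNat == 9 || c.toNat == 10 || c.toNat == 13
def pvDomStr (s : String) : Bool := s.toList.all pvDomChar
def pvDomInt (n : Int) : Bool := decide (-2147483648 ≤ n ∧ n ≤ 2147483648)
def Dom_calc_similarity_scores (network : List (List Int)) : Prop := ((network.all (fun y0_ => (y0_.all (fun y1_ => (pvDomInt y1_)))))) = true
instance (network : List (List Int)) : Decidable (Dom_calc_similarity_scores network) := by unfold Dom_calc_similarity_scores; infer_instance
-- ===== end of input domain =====

-- B replaces A's nested index loops + linear rescans by one Counter and one membership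
-- set per list built up front; each cell is then a filtered sum of counter entries (faster).

-- ===== PORT A =====
def num_in_common_between_lists (list1 list2 : List Int) : Int :=
  list1.foldl (fun similiarity friend =>
    if list2.contains friend then similiarity + 1 else similiarity) 0

def init_matrix (n : Nat) : List (List Int) :=
  (List.range n).foldl (fun matrix _row =>
    -- append the row and fill it with n zeros (the Python appends the 0s one by one
    -- to the just-appended last row; building that row before appending is the same)
    matrix ++ [(List.range n).foldl (fun row _col => row ++ [(0 : Int)]) []]) []

-- inner 'while index2 < n' loop: writes sim_matrix[index1][index2] = common
def csInner (list1 : List Int) (network : List (List Int)) (n index1 index2 : Nat)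
    (sim : List (List Int)) : List (List Int) :=
  if _h : index2 < n then
    let list2 := network.getD index2 []
    let common := num_in_common_between_lists list1 list2
    csInner list1 network n index1 (index2 + 1)
      (sim.set index1 ((sim.getD index1 []).set index2 common))
  else sim
termination_by n - index2

-- outer 'while index1 < n' loop
def csOuter (network : List (List Int)) (n index1 : Nat)
    (sim : List (List Int)) : List (List Int) :=
  if _h : index1 < n then
    let list1 := network.getD index1 []
    csOuter network n (index1 + 1) (csInner list1 network n index1 0 sim)
  else sim
termination_by n - index1

def calc_similarity_scores (network : List (List Int)) : List (List Int) :=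
  let n := network.length
  csOuter network n 0 (init_matrix n)

-- ===== PORT B =====
def calc_similarity_scores_alt (network : List (List Int)) : List (List Int) :=
  let member_sets := network.map (fun lst => PySem.Set.ofList lst)
  let counters := network.map (fun lst =>
    lst.foldl (fun c v => c.insert v (c.getD v 0 + 1)) PySem.Dict.empty)
  counters.map (fun c => member_sets.map (fun s =>
    c.items.foldl (fun acc p => if p.1 ∈ s then acc + p.2 else acc) 0))

-- ===== PRECONDITION & SPEC =====
def Spec_calc_similarity_scores (network : List (List Int)) (out : List (List Int)) : Prop := out = calc_similarity_scores_alt network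
instance (network : List (List Int)) (out : List (List Int)) : Decidable (Spec_calc_similarity_scores network out) := by unfold Spec_calc_similarity_scores; infer_instance

-- ===== CLAIM (what is proved, stated in full; the proofs are below) =====
def Claim_equal_calc_similarity_scores : Prop := ∀ (network : List (List Int)), Dom_calc_similarity_scores network → Spec_calc_similarity_scores network (calc_similarity_scores network)

-- ===== LEMMAS AND PROOFS =====

theorem foldl_append_replicate {α : Type} (x : α) (n : Nat) (init : List α) :
    (List.range n).foldl (fun acc _ => acc ++ [x]) init = init ++ List.replicate n x := by
  induction n generalizing init with
  | zero => simp
  | succ m ih =>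
    rw [List.range_succ, List.foldl_append, ih, List.foldl_cons, List.foldl_nil,
      List.replicate_succ' (n := m), List.append_assoc]

theorem init_matrix_eq (n : Nat) :
    init_matrix n = List.replicate n (List.replicate n (0 : Int)) := by
  unfold init_matrix
  simp only [foldl_append_replicate]
  simp

theorem csInner_eq (list1 : List Int) (network : List (List Int)) (index1 k : Nat)
    (sim : List (List Int))
    (hidx : index1 < sim.length)
    (hrow : (sim.getD index1 []).length = network.length) (hk : k ≤ network.length) :
    csInner list1 network network.length index1 k sim =
      sim.set index1 ((sim.getD index1 []).take k ++
        (network.drop k).map (fun list2 => num_in_common_between_lists list1 list2)) := by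
  by_cases h : k < network.length
  · rw [csInner]
    rw [dif_pos h]
    have hidx' : index1 < (sim.set index1 ((sim.getD index1 []).set k
        (num_in_common_between_lists list1 (network.getD k [])))).length := by
      simpa using hidx
    have hrow' : (((sim.set index1 ((sim.getD index1 []).set k
        (num_in_common_between_lists list1 (network.getD k [])))).getD index1 []).length)
        = network.length := by
      rw [List.getD_eq_getElem _ _ hidx', List.getElem_set_self]
      simpa using hrow
    rw [csInner_eq list1 network index1 (k+1) _ hidx' hrow' h]
    rw [List.getD_eq_getElem _ _ hidx', List.getElem_set_self, List.set_set]
    rw [List.getD_eq_getElem _ _ hidx] at hrow ⊢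
    have hkr : k < (sim[index1]).length := by omega
    -- (row.set k c).take (k+1) = row.take k ++ [c]
    have htake : ((sim[index1]).set k (num_in_common_between_lists list1 (network.getD k []))).take (k+1)
        = (sim[index1]).take k ++ [num_in_common_between_lists list1 (network.getD k [])] := by
      rw [List.set_eq_take_cons_drop _ hkr, List.take_append]
      simp [Nat.min_eq_left hkr.le]
    rw [htake]
    have hdrop : network.drop k = network[k] :: network.drop (k+1) :=
      (List.drop_eq_getElem_cons h)
    rw [hdrop, List.map_cons, List.getD_eq_getElem _ _ h, List.append_assoc]
    simp
  · have hkn : k = network.length := by omega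
    rw [csInner]
    rw [dif_neg h, hkn]
    rw [List.getD_eq_getElem _ _ hidx] at hrow ⊢
    rw [List.drop_length, List.map_nil, List.append_nil,
      List.take_of_length_le (le_of_eq hrow), List.set_getElem_self]
termination_by network.length - k

theorem csOuter_eq (network : List (List Int)) (i : Nat) (sim : List (List Int))
    (hi : i ≤ network.length) (hlen : sim.length = network.length)
    (hrows : ∀ j, i ≤ j → j < network.length → (sim.getD j []).length = network.length) :
    csOuter network network.length i sim =
      sim.take i ++ (network.drop i).map
        (fun list1 => network.map (fun list2 => num_in_common_between_lists list1 list2)) := by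
  by_cases h : i < network.length
  · rw [csOuter, dif_pos h]
    have hidx : i < sim.length := by omega
    show csOuter network network.length (i + 1)
      (csInner (network.getD i []) network network.length i 0 sim) = _
    rw [List.getD_eq_getElem network ([] : List Int) h]
    rw [csInner_eq _ network i 0 sim hidx (hrows i le_rfl h) (Nat.zero_le _)]
    rw [List.drop_zero]
    set newrow := network.map (fun list2 =>
      num_in_common_between_lists network[i] list2) with hnr
    have hset : sim.set i ((sim.getD i []).take 0 ++ network.map
        (fun list2 => num_in_common_between_lists network[i] list2)) = sim.set i newrow := by
      simp [hnr]
    rw [hset]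
    have hlen' : (sim.set i newrow).length = network.length := by simpa using hlen
    have hrows' : ∀ j, i+1 ≤ j → j < network.length →
        ((sim.set i newrow).getD j []).length = network.length := by
      intro j hj hjn
      have hjs : j < (sim.set i newrow).length := by omega
      rw [List.getD_eq_getElem _ _ hjs, List.getElem_set_ne (by omega) hjs,
        ← List.getD_eq_getElem _ ([]) (by omega)]
      exact hrows j (by omega) hjn
    rw [csOuter_eq network (i+1) _ h hlen' hrows']
    have htake : (sim.set i newrow).take (i+1) = sim.take i ++ [newrow] := by
      rw [List.set_eq_take_cons_drop _ hidx, List.take_append]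
      simp [Nat.min_eq_left hidx.le]
    rw [htake, List.drop_eq_getElem_cons h, List.map_cons, List.append_assoc]
    simp [hnr]
  · have hin : i = network.length := by omega
    rw [csOuter, dif_neg h, hin, List.drop_of_length_le le_rfl, List.map_nil,
      List.append_nil, List.take_of_length_le (by omega)]
termination_by network.length - i

theorem calcA_eq (network : List (List Int)) :
    calc_similarity_scores network =
      network.map (fun list1 => network.map
        (fun list2 => num_in_common_between_lists list1 list2)) := by
  unfold calc_similarity_scores
  rw [csOuter_eq network 0 _ (Nat.zero_le _) (by simp [init_matrix_eq])
    (by intro j _ hj; rw [init_matrix_eq]; simp [hj])]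
  simp

theorem sum_count_mem (l1 l2 : List Int) :
    ∑ a ∈ l1.toFinset, (if a ∈ l2 then l1.count a else 0) =
      (l1.filter (fun x => l2.contains x)).length := by
  rw [← List.sum_toFinset_count_eq_length (l1.filter (fun x => l2.contains x))]
  have hsub : (l1.filter (fun x => l2.contains x)).toFinset ⊆ l1.toFinset := by
    intro a ha
    rw [List.mem_toFinset, List.mem_filter] at ha
    exact List.mem_toFinset.mpr ha.1
  rw [← Finset.sum_subset hsub (f := fun a => if a ∈ l2 then l1.count a else 0)]
  · refine Finset.sum_congr rfl (fun a ha => ?_)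
    rw [List.mem_toFinset, List.mem_filter] at ha
    rw [List.count_filter ha.2, if_pos (List.contains_iff_mem.mp ha.2)]
  · intro a ha hna
    rw [List.mem_toFinset] at ha
    rw [List.mem_toFinset, List.mem_filter] at hna
    rw [if_neg (fun hm => hna ⟨ha, List.contains_iff_mem.mpr hm⟩)]

theorem cell_eq (l1 l2 : List Int) :
    ((l1.foldl (fun c v => c.insert v (c.getD v 0 + 1)) PySem.Dict.empty).items.foldl
      (fun acc p => if p.1 ∈ PySem.Set.ofList l2 then acc + p.2 else acc) 0) =
    num_in_common_between_lists l1 l2 := by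
  unfold num_in_common_between_lists
  rw [PySem.Dict.foldl_insert_getD_add_one_eq_counter, PySem.Dict.items_counter, List.foldl_map, PySem.List.foldl_count_if]
  have h1 : ∀ (acc : Int) (k : Int),
      (if k ∈ PySem.Set.ofList l2 then acc + (l1.count k : Int) else acc) =
        acc + (if k ∈ l2 then (l1.count k : Int) else 0) := by
    intro acc k
    simp only [PySem.Set.mem_ofList]; split_ifs <;> simp
  simp only [h1]
  rw [PySem.List.foldl_add]
  have h2 : (List.map (fun k => if k ∈ l2 then (l1.count k : Int) else 0) (PySem.Set.ofList l1)).sum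
      = ((∑ a ∈ l1.toFinset, (if a ∈ l2 then l1.count a else 0) : Nat) : Int) := by
    rw [← List.sum_toFinset (l := PySem.Set.ofList l1)
        (f := fun k => if k ∈ l2 then (l1.count k : Int) else 0) (PySem.Set.nodup_ofList l1)]
    have hts : (PySem.Set.ofList l1).toFinset = l1.toFinset := by
      ext a; simp [PySem.Set.mem_ofList]
    rw [hts]
    push_cast
    refine Finset.sum_congr rfl (fun a _ => ?_)
    split_ifs <;> simp
  rw [h2, sum_count_mem, List.countP_eq_length_filter]

-- ===== VERDICT (by name: the statement is the Claim_ definition above) =====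
theorem calc_similarity_scores_spec : Claim_equal_calc_similarity_scores := by
  intro network _
  unfold Spec_calc_similarity_scores calc_similarity_scores_alt
  simp only [calcA_eq, List.map_map]
  refine List.map_congr_left (fun l1 _ => List.map_congr_left (fun l2 _ => ?_))
  exact (cell_eq l1 l2).symm
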